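-- pv_equiv track=rewrite | github.com/t-chamb/RetroMod-Tetris-Decompilation | comprehensive_graphics_analysis.py | extract_1bpp_tiles
-- ===== SOURCE A (Python) =====
-- def extract_1bpp_tiles(data):
--     """Extract 1BPP tiles"""
--     tiles = []
--     for i in range(0, len(data), 8):
--         if i + 8 > len(data):
--             break
--         tile_data = data[i:i + 8]
--         tile = []
--         for byte in tile_data:
--             for bit in range(7, -1, -1):
--                 pixel = (byte >> bit) & 1
--                 tile.append(pixel * 3)  # Convert to 2bpp scale
--         if len(tile) == 64:
--             tiles.append(tile)
--     return tiles
-- ===== SOURCE B (Python) =====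
-- def extract_1bpp_tiles(data):
--     """Extract 1BPP tiles"""
--     # Unpack the whole input into one flat pixel stream, then chunk it into
--     # full 64-pixel tiles (a partial trailing block is dropped).
--     pixels = [((byte >> bit) & 1) * 3 for byte in data for bit in range(7, -1, -1)]
--     return [pixels[i:i + 64] for i in range(0, len(pixels) - 63, 64)]
-- ===== Notes on version B (the rewrite author's own statement) =====
-- stated objective: alternative
-- what changed: B reverses the two phases: instead of A's chunk-8-bytes-then-unpack-each-byte nested loops with a break, B unpacks the whole input into one flat pixel list and then slices it into consecutive full 64-pixel blocks, dropping any partial trailing block.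
import Mathlib
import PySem

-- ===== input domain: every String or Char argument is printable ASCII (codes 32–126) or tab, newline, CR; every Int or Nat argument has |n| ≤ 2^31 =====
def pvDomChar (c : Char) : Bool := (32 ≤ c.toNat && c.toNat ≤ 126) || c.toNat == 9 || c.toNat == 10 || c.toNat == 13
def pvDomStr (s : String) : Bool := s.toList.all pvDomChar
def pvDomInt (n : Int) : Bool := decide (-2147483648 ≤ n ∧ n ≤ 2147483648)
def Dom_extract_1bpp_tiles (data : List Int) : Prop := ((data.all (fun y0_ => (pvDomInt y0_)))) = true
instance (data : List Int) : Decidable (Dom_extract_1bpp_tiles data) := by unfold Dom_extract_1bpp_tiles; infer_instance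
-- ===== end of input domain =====

-- B unpacks all bytes into one flat pixel list and then slices it into full 64-pixel blocks,
-- where A chunks the input into 8-byte groups first and unpacks each; return values proved equal.

-- ===== PORT A =====
-- inner loops: for byte in tile_data: for bit in range(7,-1,-1): tile.append(((byte>>bit)&1)*3)
-- (bit ranges over 7..0 so 'bit.toNat' is exact; Python's '>>'/'&' are '>>>'/PySem.Int.band)
def pvTileA (tile_data : List Int) : List Int :=
  tile_data.foldl (fun tile byte =>
    (PySem.List.pyRange 7 (-1) (-1)).foldl
      (fun tile bit => tile ++ [PySem.Int.band (byte >>> bit.toNat) 1 * 3]) tile) []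

-- for i in range(0, len(data), 8) with the 'if i + 8 > len(data): break' guard
def pvLoopA (data : List Int) (i : Int) (tiles : List (List Int)) : List (List Int) :=
  if i < (data.length : Int) then
    if i + 8 > (data.length : Int) then tiles
    else
      let tile := pvTileA (PySem.List.slice data (some i) (some (i + 8)))
      pvLoopA data (i + 8) (if tile.length = 64 then tiles ++ [tile] else tiles)
  else tiles
termination_by ((data.length : Int) - i).toNat
decreasing_by omega

def extract_1bpp_tiles (data : List Int) : List (List Int) :=
  pvLoopA data 0 []

-- ===== PORT B =====
def extract_1bpp_tiles_alt (data : List Int) : List (List Int) :=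
  let pixels := data.flatMap (fun byte =>
    (PySem.List.pyRange 7 (-1) (-1)).map (fun bit => PySem.Int.band (byte >>> bit.toNat) 1 * 3))
  (PySem.List.pyRange 0 ((pixels.length : Int) - 63) 64).map
    (fun i => PySem.List.slice pixels (some i) (some (i + 64)))

-- ===== PRECONDITION & SPEC =====
def Spec_extract_1bpp_tiles (data : List Int) (out : List (List Int)) : Prop := out = extract_1bpp_tiles_alt data
instance (data : List Int) (out : List (List Int)) : Decidable (Spec_extract_1bpp_tiles data out) := by unfold Spec_extract_1bpp_tiles; infer_instance

-- ===== CLAIM (what is proved, stated in full; the proofs are below) =====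
def Claim_equal_extract_1bpp_tiles : Prop := ∀ (data : List Int), Dom_extract_1bpp_tiles data → Spec_extract_1bpp_tiles data (extract_1bpp_tiles data)

-- ===== LEMMAS AND PROOFS =====

-- the per-byte 8-pixel block both programs produce
def pvPix (byte : Int) : List Int :=
  (PySem.List.pyRange 7 (-1) (-1)).map (fun bit => PySem.Int.band (byte >>> bit.toNat) 1 * 3)

-- the common chunked form: one 8-byte tile at a time
def pvGo (l : List Int) : List (List Int) :=
  if 8 ≤ l.length then (l.take 8).flatMap pvPix :: pvGo (l.drop 8) else []
termination_by l.length
decreasing_by simp [List.length_drop]; omega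

theorem pvPix_length (b : Int) : (pvPix b).length = 8 := by
  simp [pvPix]

theorem pvTileA_aux (l : List Int) (acc : List Int) :
    l.foldl (fun tile byte =>
      (PySem.List.pyRange 7 (-1) (-1)).foldl
        (fun tile bit => tile ++ [PySem.Int.band (byte >>> bit.toNat) 1 * 3]) tile) acc
      = acc ++ l.flatMap pvPix := by
  induction l generalizing acc with
  | nil => simp
  | cons b t ih =>
    rw [List.foldl_cons, PySem.List.foldl_append_singleton_eq_map, ih]
    simp only [pvPix, List.flatMap_cons, List.append_assoc, Int.shiftRight_natCast_right]

theorem pvTileA_eq (l : List Int) : pvTileA l = l.flatMap pvPix := by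
  unfold pvTileA
  exact (pvTileA_aux l []).trans (List.nil_append _)

theorem pvFlat_drop8 (l : List Int) : (l.flatMap pvPix).drop 8 = l.tail.flatMap pvPix := by
  cases l with
  | nil => simp
  | cons b t =>
    simp only [List.flatMap_cons, List.tail_cons]
    rw [show (8 : Nat) = (pvPix b).length from (pvPix_length b).symm, List.drop_left]

theorem pvFlat_take8 (l : List Int) : (l.flatMap pvPix).take 8 = (l.take 1).flatMap pvPix := by
  cases l with
  | nil => simp
  | cons b t =>
    simp only [List.flatMap_cons, List.take_succ_cons, List.take_zero, List.flatMap_cons,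
      List.flatMap_nil, List.append_nil]
    rw [show (8 : Nat) = (pvPix b).length from (pvPix_length b).symm, List.take_left]

theorem pvFlat_drop (c : Nat) (l : List Int) :
    (l.flatMap pvPix).drop (8 * c) = (l.drop c).flatMap pvPix := by
  induction c generalizing l with
  | zero => simp
  | succ n ih =>
    have : 8 * (n + 1) = 8 + 8 * n := by ring
    rw [this, ← List.drop_drop, pvFlat_drop8, ih, List.drop_tail]

theorem pvFlat_take (c : Nat) (l : List Int) :
    (l.flatMap pvPix).take (8 * c) = (l.take c).flatMap pvPix := by
  induction c generalizing l with
  | zero => simp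
  | succ n ih =>
    have h8 : 8 * (n + 1) = 8 + 8 * n := by ring
    rw [h8, List.take_add, pvFlat_take8, pvFlat_drop8, ih]
    cases l with
    | nil => simp
    | cons b t => simp [List.flatMap_cons]

theorem pvFlat_length (l : List Int) : (l.flatMap pvPix).length = 8 * l.length := by
  induction l with
  | nil => simp
  | cons b t ih => simp [List.flatMap_cons, ih, pvPix_length]; ring

theorem pvLoopA_eq (data : List Int) (i : Int) (tiles : List (List Int)) :
    0 ≤ i → pvLoopA data i tiles = tiles ++ pvGo (data.drop i.toNat) := by
  fun_induction pvLoopA data i tiles with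
  | case1 i tiles hlt hbrk =>
    intro h0
    have hs : ¬ 8 ≤ (data.drop i.toNat).length := by simp [List.length_drop]; omega
    rw [pvGo, if_neg hs]
    simp
  | case2 i tiles hlt hbrk tile ih =>
    intro h0
    have h8 : (0:Int) ≤ i + 8 := by omega
    have hsl : PySem.List.slice data (some i) (some (i + 8)) = (data.drop i.toNat).take 8 := by
      rw [PySem.List.slice_toNat data h0 h8]
      congr 1
      omega
    have hlen : (data.drop i.toNat).length = data.length - i.toNat := by simp
    have htile : tile = ((data.drop i.toNat).take 8).flatMap pvPix := by
      rw [show tile = pvTileA (PySem.List.slice data (some i) (some (i + 8))) from rfl,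
        hsl, pvTileA_eq]
    have htlen : tile.length = 64 := by
      rw [htile, pvFlat_length]
      simp [List.length_take]
      omega
    have ih' := ih h8
    rw [dif_pos htlen] at ih'
    rw [if_pos htlen, ih']
    have h8le : 8 ≤ (data.drop i.toNat).length := by omega
    have hdd : data.drop (i + 8).toNat = (data.drop i.toNat).drop 8 := by
      rw [List.drop_drop]
      congr 1
      omega
    conv_rhs => rw [pvGo, if_pos h8le]
    rw [hdd, htile]
    simp
  | case3 i tiles hlt =>
    intro h0
    have : data.drop i.toNat = [] := by
      apply List.drop_eq_nil_of_le
      omega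
    rw [this, pvGo]
    simp

theorem pvChunk_eq (data : List Int) :
    (List.range (data.length / 8)).map
      (fun k => ((data.flatMap pvPix).drop (64 * k)).take 64) = pvGo data := by
  fun_induction pvGo data with
  | case1 l h ih =>
    have hM : l.length / 8 = (l.drop 8).length / 8 + 1 := by
      simp [List.length_drop]
      omega
    rw [hM, List.range_succ_eq_map, List.map_cons, List.map_map]
    have hhead : ((l.flatMap pvPix).drop (64 * 0)).take 64 = (l.take 8).flatMap pvPix := by
      rw [Nat.mul_zero, List.drop_zero, show (64:Nat) = 8 * 8 from rfl, pvFlat_take]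
    have h64 : (l.flatMap pvPix).drop 64 = (l.drop 8).flatMap pvPix := by
      rw [show (64:Nat) = 8 * 8 from rfl, pvFlat_drop]
    have htail : ∀ k : Nat, ((l.flatMap pvPix).drop (64 * (k + 1))).take 64
        = (((l.drop 8).flatMap pvPix).drop (64 * k)).take 64 := by
      intro k
      rw [← h64, List.drop_drop]
      congr 2
      ring
    rw [hhead]
    congr 1
    rw [← ih]
    apply List.map_congr_left
    intro k _
    simpa using htail k
  | case2 l h =>
    have : l.length / 8 = 0 := by omega
    simp [this]

theorem pvAlt_eq (data : List Int) : extract_1bpp_tiles_alt data = pvGo data := by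
  unfold extract_1bpp_tiles_alt
  simp only [← Int.shiftRight_natCast_right]
  show (PySem.List.pyRange 0 (((data.flatMap pvPix).length : Int) - 63) 64).map
      (fun i => PySem.List.slice (data.flatMap pvPix) (some i) (some (i + 64))) = pvGo data
  rw [pvFlat_length, PySem.List.pyRange_of_pos 0 (((8 * data.length : Nat) : Int) - 63)
    (by norm_num : (0:Int) < 64), List.map_map]
  have hm : (if (0:Int) < ((8 * data.length : Nat) : Int) - 63 then
      ((((8 * data.length : Nat) : Int) - 63 - 0 + 64 - 1) / 64).toNat else 0)
      = data.length / 8 := by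
    split_ifs with h <;> omega
  rw [hm, ← pvChunk_eq]
  apply List.map_congr_left
  intro k _
  have h1 : (0:Int) + 64 * (k:Int) = ((64 * k : Nat) : Int) := by push_cast; ring
  have h2 : ((64 * k : Nat) : Int) + 64 = ((64 * k : Nat) : Int) + ((64:Nat) : Int) := by
    norm_num
  simp only [Function.comp_apply, h1, h2, PySem.List.slice_natCast_add]

-- ===== VERDICT (by name: the statement is the Claim_ definition above) =====
theorem extract_1bpp_tiles_spec : Claim_equal_extract_1bpp_tiles := by
  intro data _
  unfold Spec_extract_1bpp_tiles
  rw [pvAlt_eq, extract_1bpp_tiles, pvLoopA_eq data 0 [] le_rfl]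
  simp
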